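-- pv_equiv track=rewrite | github.com/KyanBergeron4Runr/4Runr-AI-Lead-System | deployment_package/4runr-lead-scraper/utils/website_content_analyzer.py | _combine_content
-- ===== SOURCE A (Python) =====
-- from typing import Dict, Any, List, Optional, Tuple
--
-- def _combine_content(content_by_page: Dict[str, str]) -> str:
--     """
--     Combine content from all pages for analysis.
--
--     Args:
--         content_by_page: Content organized by page type
--
--     Returns:
--         Combined content string
--     """
--     if not content_by_page:
--         return ""
--
--     # Prioritize page order for combination
--     page_priority = ['about', 'company', 'home', 'services', 'contact', 'mission']
--     combined_parts = []
--
--     # Add prioritized pages first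
--     for page_type in page_priority:
--         if page_type in content_by_page and content_by_page[page_type]:
--             combined_parts.append(content_by_page[page_type])
--
--     # Add remaining pages
--     for page_type, content in content_by_page.items():
--         if page_type not in page_priority and content:
--             combined_parts.append(content)
--
--     return ' '.join(combined_parts)
-- ===== SOURCE B (Python) =====
-- def _combine_content(content_by_page):
--     page_priority = ['about', 'company', 'home', 'services', 'contact', 'mission']
--     rank = {p: i for i, p in enumerate(page_priority)}
--     buckets = {}
--     for page_type, content in content_by_page.items():
--         if content:
--             buckets.setdefault(rank.get(page_type, len(page_priority)), []).append(content)
--     return ' '.join(c for k in range(len(page_priority) + 1) for c in buckets.get(k, []))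
-- ===== Notes on version B (the rewrite author's own statement) =====
-- stated objective: alternative
-- what changed: A makes two separate passes (a membership-and-lookup scan driven by the priority list, then a second scan for non-priority pages); B makes one pass over the items, bucketing truthy contents by a precomputed rank (index in the priority list, else 6), then concatenates the buckets in rank order.
import Mathlib
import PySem

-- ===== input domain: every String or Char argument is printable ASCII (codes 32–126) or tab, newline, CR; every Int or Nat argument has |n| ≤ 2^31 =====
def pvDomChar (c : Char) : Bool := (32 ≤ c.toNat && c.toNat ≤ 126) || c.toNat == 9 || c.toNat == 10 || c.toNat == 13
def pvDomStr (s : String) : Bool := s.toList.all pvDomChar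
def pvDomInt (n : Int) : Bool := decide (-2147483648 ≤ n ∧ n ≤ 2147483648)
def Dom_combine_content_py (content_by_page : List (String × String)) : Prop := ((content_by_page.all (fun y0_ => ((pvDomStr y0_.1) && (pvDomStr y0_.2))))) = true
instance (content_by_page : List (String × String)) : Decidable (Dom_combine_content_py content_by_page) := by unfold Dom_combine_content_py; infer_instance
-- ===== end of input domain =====

-- B replaces A's two filtered passes (priority-driven lookups, then a scan for the rest) by one
-- grouping pass that buckets truthy contents under a precomputed rank and concatenates the buckets.

-- ===== PORT A =====
-- the literal page_priority list both Pythons contain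
def pvPriority : List String := ["about", "company", "home", "services", "contact", "mission"]

def combine_content_py (content_by_page : List (String × String)) : String :=
  if content_by_page = [] then ""
  else
    let d : PySem.Dict String String := PySem.Dict.mk content_by_page
    -- for page_type in page_priority: if page_type in content_by_page and content_by_page[page_type]
    let parts1 : List String := pvPriority.foldl (fun acc p =>
      match d.get? p with
      | some c => if c ≠ "" then acc ++ [c] else acc
      | none => acc) []
    -- for page_type, content in content_by_page.items(): if page_type not in page_priority and content
    let parts : List String := content_by_page.foldl (fun acc x =>
      if ¬ (pvPriority.contains x.1 = true) ∧ x.2 ≠ "" then acc ++ [x.2] else acc) parts1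
    PySem.Str.join " " parts

-- ===== PORT B =====
-- rank = {p: i for i, p in enumerate(page_priority)}
def pvRank : PySem.Dict String Int :=
  (PySem.List.enumerate pvPriority).foldl (fun d p => d.insert p.2 p.1) PySem.Dict.empty

def combine_content_py_alt (content_by_page : List (String × String)) : String :=
  let buckets : PySem.Dict Int (List String) := content_by_page.foldl
    (fun b x => if x.2 ≠ "" then b.modify (pvRank.getD x.1 6) [] (· ++ [x.2]) else b)
    PySem.Dict.empty
  let parts : List String := (PySem.List.pyRange 0 7).foldl (fun acc k => acc ++ buckets.getD k []) []
  PySem.Str.join " " parts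

-- ===== PRECONDITION & SPEC =====
-- Pre_ excludes association lists with duplicate keys: they do not represent any Python dict
-- (A's parameter is a dict, whose keys are unique), so no behaviour is specified there.
def Pre_combine_content_py (content_by_page : List (String × String)) : Prop :=
  (content_by_page.map Prod.fst).Nodup
instance (content_by_page : List (String × String)) : Decidable (Pre_combine_content_py content_by_page) := by unfold Pre_combine_content_py; infer_instance

def pvWitness_combine_content_py : (List (String × String)) :=
  [("about", "we are 4Runr"), ("blog", "news"), ("home", "")]

def Spec_combine_content_py (content_by_page : List (String × String)) (out : String) : Prop := out = combine_content_py_alt content_by_page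
instance (content_by_page : List (String × String)) (out : String) : Decidable (Spec_combine_content_py content_by_page out) := by unfold Spec_combine_content_py; infer_instance

-- ===== CLAIM (what is proved, stated in full; the proofs are below) =====
def Claim_equal_combine_content_py : Prop := ∀ (content_by_page : List (String × String)), Dom_combine_content_py content_by_page → Pre_combine_content_py content_by_page → Spec_combine_content_py content_by_page (combine_content_py content_by_page)

-- ===== LEMMAS AND PROOFS =====

-- what A's priority loop contributes for one priority page
def pvSel (d : PySem.Dict String String) (p : String) : List String :=
  match d.get? p with
  | some c => if c ≠ "" then [c] else []
  | none => []

-- B's bucket k, as a filter of the items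
def pvBucket (l : List (String × String)) (k : Int) : List String :=
  ((l.filter (fun x => decide (x.2 ≠ ""))).filter (fun x => pvRank.getD x.1 6 == k)).map (·.2)

set_option maxRecDepth 4000 in
lemma pvRank_getD (s : String) : pvRank.getD s 6 =
    if s = "about" then 0 else if s = "company" then 1 else if s = "home" then 2
    else if s = "services" then 3 else if s = "contact" then 4 else if s = "mission" then 5
    else (6 : Int) := by
  have h : pvRank = PySem.Dict.mk [("about", 0), ("company", 1), ("home", 2),
      ("services", 3), ("contact", 4), ("mission", 5)] := by decide
  have hnil : (PySem.Dict.mk ([] : List (String × Int))).get? s = none := rfl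
  rw [h]
  simp only [PySem.Dict.getD, PySem.Dict.get?_mk_cons, hnil, beq_iff_eq]
  clear h hnil
  split_ifs <;> subst_vars <;> simp_all

-- A's priority loop is flatMap pvSel
lemma partsA_priority (d : PySem.Dict String String) (acc : List String) :
    pvPriority.foldl (fun acc p =>
      match d.get? p with
      | some c => if c ≠ "" then acc ++ [c] else acc
      | none => acc) acc = acc ++ pvPriority.flatMap (pvSel d) := by
  have hb : (fun (acc : List String) (p : String) =>
      match d.get? p with
      | some c => if c ≠ "" then acc ++ [c] else acc
      | none => acc) = fun acc p => acc ++ pvSel d p := by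
    funext acc p
    unfold pvSel
    cases d.get? p with
    | none => simp
    | some c => by_cases hc : c = "" <;> simp [hc]
  rw [hb, PySem.List.foldl_append_eq_flatMap]

-- nodup keys: filtering an association list by one key matches the first-match lookup
lemma pvFilter_get (l : List (String × String)) (hn : (l.map Prod.fst).Nodup) (k : String) :
    ((l.filter (fun x => decide (x.2 ≠ ""))).filter (fun x => x.1 == k)).map (·.2)
      = pvSel (PySem.Dict.mk l) k := by
  induction l with
  | nil => simp [pvSel, PySem.Dict.get?]
  | cons a t ih =>
    simp only [List.map_cons, List.nodup_cons] at hn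
    have ih' := ih hn.2
    unfold pvSel
    rw [PySem.Dict.get?_mk_cons]
    by_cases hk : a.1 = k
    · subst hk
      have ht : (t.filter (fun x => decide (x.2 ≠ ""))).filter (fun x => x.1 == a.1) = [] := by
        rw [List.filter_eq_nil_iff]
        intro x hx
        have hxt : x ∈ t := (List.mem_filter.mp hx).1
        have hxm : x.1 ∈ t.map Prod.fst := List.mem_map_of_mem hxt
        simp only [beq_iff_eq]
        intro hxe
        exact hn.1 (hxe ▸ hxm)
      by_cases he : a.2 = ""
      · rw [List.filter_cons_of_neg (by simp [he]), ht]
        simp [he]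
      · rw [List.filter_cons_of_pos (by simp [he]),
            List.filter_cons_of_pos (by simp), ht]
        simp [he]
    · have hbk : (a.1 == k) = false := by simp [hk]
      by_cases he : a.2 = ""
      · rw [List.filter_cons_of_neg (by simp [he]), ih', hbk]
        simp [pvSel]
      · rw [List.filter_cons_of_pos (by simp [he]),
            List.filter_cons_of_neg (by simp [hbk]), ih', hbk]
        simp [pvSel]

-- B as the concatenation of its seven buckets
lemma partsB_eq (l : List (String × String)) : combine_content_py_alt l =
    PySem.Str.join " " (pvBucket l 0 ++ pvBucket l 1 ++ pvBucket l 2 ++ pvBucket l 3 ++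
      pvBucket l 4 ++ pvBucket l 5 ++ pvBucket l 6) := by
  unfold combine_content_py_alt
  have hr : PySem.List.pyRange 0 7 = [0, 1, 2, 3, 4, 5, 6] := by decide
  have hb : ∀ k : Int,
      (l.foldl (fun b x => if x.2 ≠ "" then b.modify (pvRank.getD x.1 6) [] (· ++ [x.2]) else b)
        PySem.Dict.empty).getD k [] = pvBucket l k := by
    intro k
    rw [PySem.List.foldl_ite_eq_foldl_filter]
    have hm : (l.filter (fun x => decide (x.2 ≠ ""))).foldl
        (fun b x => b.modify (pvRank.getD x.1 6) [] (· ++ [x.2])) PySem.Dict.empty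
        = ((l.filter (fun x => decide (x.2 ≠ ""))).map
            (fun x => (pvRank.getD x.1 6, x.2))).foldl
            (fun d p => d.modify p.1 [] (· ++ [p.2])) PySem.Dict.empty := by
      rw [List.foldl_map]
    rw [hm, PySem.Dict.getD_foldl_modify_append, List.filter_map, List.map_map]
    unfold pvBucket
    simp [Function.comp_def, PySem.Dict.getD, PySem.Dict.empty, PySem.Dict.get?]
  rw [hr]
  simp only [List.foldl_cons, List.foldl_nil, List.nil_append, hb, List.append_assoc]

lemma bucket_rank (l : List (String × String)) (k : Int) (p : String)
    (hpk : ∀ s : String, pvRank.getD s 6 = k ↔ s = p) :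
    pvBucket l k = ((l.filter (fun x => decide (x.2 ≠ ""))).filter (fun x => x.1 == p)).map (·.2) := by
  unfold pvBucket
  congr 1
  apply List.filter_congr
  intro x _
  rw [Bool.eq_iff_iff]
  simp [hpk x.1]

lemma bucket_six (l : List (String × String)) :
    pvBucket l 6 = (l.filter (fun x =>
      decide (¬ (pvPriority.contains x.1 = true) ∧ x.2 ≠ ""))).map (·.2) := by
  unfold pvBucket
  rw [List.filter_filter]
  congr 1
  apply List.filter_congr
  intro x _
  rw [Bool.eq_iff_iff]
  rw [pvRank_getD x.1]
  by_cases h1 : x.1 = "about" <;> by_cases h2 : x.1 = "company" <;> by_cases h3 : x.1 = "home" <;>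
    by_cases h4 : x.1 = "services" <;> by_cases h5 : x.1 = "contact" <;> by_cases h6 : x.1 = "mission" <;>
    simp_all [pvPriority]

-- ===== VERDICT (by name: the statement is the Claim_ definition above) =====
set_option maxRecDepth 4000 in
theorem combine_content_py_spec : Claim_equal_combine_content_py := by
  unfold Claim_equal_combine_content_py
  intro l _hdom hpre
  unfold Spec_combine_content_py
  by_cases hl : l = []
  · subst hl; decide
  · have h0 : ∀ s : String, pvRank.getD s 6 = 0 ↔ s = "about" := by
      intro s; rw [pvRank_getD]; split_ifs <;> subst_vars <;> simp_all
    have h1 : ∀ s : String, pvRank.getD s 6 = 1 ↔ s = "company" := by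
      intro s; rw [pvRank_getD]; split_ifs <;> subst_vars <;> simp_all
    have h2 : ∀ s : String, pvRank.getD s 6 = 2 ↔ s = "home" := by
      intro s; rw [pvRank_getD]; split_ifs <;> subst_vars <;> simp_all
    have h3 : ∀ s : String, pvRank.getD s 6 = 3 ↔ s = "services" := by
      intro s; rw [pvRank_getD]; split_ifs <;> subst_vars <;> simp_all
    have h4 : ∀ s : String, pvRank.getD s 6 = 4 ↔ s = "contact" := by
      intro s; rw [pvRank_getD]; split_ifs <;> subst_vars <;> simp_all
    have h5 : ∀ s : String, pvRank.getD s 6 = 5 ↔ s = "mission" := by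
      intro s; rw [pvRank_getD]; split_ifs <;> subst_vars <;> simp_all
    rw [partsB_eq]
    unfold combine_content_py
    rw [if_neg hl]
    simp only []
    rw [partsA_priority, PySem.List.foldl_append_ite]
    rw [bucket_rank l 0 "about" h0, bucket_rank l 1 "company" h1, bucket_rank l 2 "home" h2,
        bucket_rank l 3 "services" h3, bucket_rank l 4 "contact" h4, bucket_rank l 5 "mission" h5,
        bucket_six]
    rw [pvFilter_get l hpre "about", pvFilter_get l hpre "company", pvFilter_get l hpre "home",
        pvFilter_get l hpre "services", pvFilter_get l hpre "contact", pvFilter_get l hpre "mission"]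
    simp [pvPriority, List.flatMap_cons, List.append_assoc]
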